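-- pv_equiv track=rewrite | github.com/matanich05/Programiranje1 | seminarska_naloga/2. del/battle_simulation/battle_simulation.py | protinapad
-- ===== SOURCE A (Python) =====
-- def protinapad(niz):
--     obramba = []
--     i = 0
--     dolzina = len(niz)
--     while i < dolzina:
--         if i + 2 < dolzina:
--             c1, c2, c3 = niz[i], niz[i+1], niz[i+2]
--             if 'R' in (c1, c2, c3) and 'B' in (c1, c2, c3) and 'L' in (c1, c2, c3):
--                 obramba.append('C')
--                 i += 3
--                 continue
--         if niz[i] == 'R':
--             obramba.append('S')
--         elif niz[i] == 'B':
--             obramba.append('K')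
--         else:
--             obramba.append('H')
--         i += 1
--     return ''.join(obramba)
-- ===== SOURCE B (Python) =====
-- import re
--
-- # Six permutations of 'RBL' tried before the catch-all single character;
-- # DOTALL so '.' also matches newlines.  re.sub performs the greedy
-- # left-to-right scan, preferring a triple at each position.
-- _PAT = re.compile(r'RBL|RLB|BRL|BLR|LRB|LBR|.', re.DOTALL)
--
--
-- def _repl(m):
--     t = m.group(0)
--     if len(t) == 3:
--         return 'C'
--     return 'S' if t == 'R' else ('K' if t == 'B' else 'H')
--
--
-- def protinapad(niz):
--     return _PAT.sub(_repl, niz)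
-- ===== Notes on version B (the rewrite author's own statement) =====
-- stated objective: idiomatic
-- what changed: Replaced A's hand-written index/lookahead while loop by a single re.sub with a compiled DOTALL pattern alternating the six permutations of 'RBL' before a catch-all single-character match, with a replacement function mapping a triple to 'C' and a single char to S/K/H; the regex engine performs the greedy left-to-right scan.
import Mathlib
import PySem

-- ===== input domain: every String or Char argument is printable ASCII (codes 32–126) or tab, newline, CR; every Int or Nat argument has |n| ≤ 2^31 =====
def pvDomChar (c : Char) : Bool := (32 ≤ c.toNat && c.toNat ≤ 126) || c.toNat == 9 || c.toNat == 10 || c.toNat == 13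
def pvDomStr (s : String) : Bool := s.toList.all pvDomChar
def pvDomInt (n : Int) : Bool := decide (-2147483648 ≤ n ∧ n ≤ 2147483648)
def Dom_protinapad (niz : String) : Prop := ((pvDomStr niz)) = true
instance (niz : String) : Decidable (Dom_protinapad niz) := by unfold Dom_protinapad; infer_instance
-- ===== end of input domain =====

-- B replaces A's hand-written index/lookahead while loop by one re.sub over a DOTALL
-- pattern alternating the six permutations of 'RBL' before a catch-all '.' (objective: idiomatic).

-- ===== PORT A =====
-- A's while loop over an index i, appending to 'obramba'; obramba is a list of chars
-- (each Python append is a one-character string), joined at the end.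
def protinapadLoop (cs : List Char) (dolzina : Nat) (i : Nat) (obramba : List Char) :
    List Char :=
  if _h : i < dolzina then
    let c1 := cs.getD i ' '
    let c2 := cs.getD (i + 1) ' '
    let c3 := cs.getD (i + 2) ' '
    if decide (i + 2 < dolzina) &&
        ((c1 == 'R' || c2 == 'R' || c3 == 'R') &&
         (c1 == 'B' || c2 == 'B' || c3 == 'B') &&
         (c1 == 'L' || c2 == 'L' || c3 == 'L')) then
      protinapadLoop cs dolzina (i + 3) (obramba ++ ['C'])
    else if c1 == 'R' then
      protinapadLoop cs dolzina (i + 1) (obramba ++ ['S'])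
    else if c1 == 'B' then
      protinapadLoop cs dolzina (i + 1) (obramba ++ ['K'])
    else
      protinapadLoop cs dolzina (i + 1) (obramba ++ ['H'])
  else obramba
termination_by dolzina - i

def protinapad (niz : String) : String :=
  String.mk (protinapadLoop niz.toList niz.toList.length 0 [])

-- ===== PORT B =====
-- PySem has no regex, so re.sub with the pattern 'RBL|RLB|BRL|BLR|LRB|LBR|.' (DOTALL)
-- is hand-ported EXACTLY by its semantics for this pattern: at each position the
-- alternatives are tried in order (the six 3-char literals first, then any single
-- char), the first match is replaced, and scanning resumes after it.
def altPerms : List (List Char) :=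
  [['R','B','L'], ['R','L','B'], ['B','R','L'], ['B','L','R'], ['L','R','B'], ['L','B','R']]

-- _repl for a single-character match
def altRepl1 (c : Char) : Char :=
  if c == 'R' then 'S' else if c == 'B' then 'K' else 'H'

def altSub : List Char → List Char
  | [] => []
  | c :: rest =>
    if altPerms.any (fun p => p.isPrefixOf (c :: rest)) then
      'C' :: altSub (rest.drop 2)
    else
      altRepl1 c :: altSub rest
termination_by cs => cs.length
decreasing_by all_goals simp

def protinapad_alt (niz : String) : String :=
  String.mk (altSub niz.toList)

-- ===== PRECONDITION & SPEC =====
def Spec_protinapad (niz : String) (out : String) : Prop := out = protinapad_alt niz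
instance (niz : String) (out : String) : Decidable (Spec_protinapad niz out) := by unfold Spec_protinapad; infer_instance

-- ===== CLAIM (what is proved, stated in full; the proofs are below) =====
def Claim_equal_protinapad : Prop := ∀ (niz : String), Dom_protinapad niz → Spec_protinapad niz (protinapad niz)

-- ===== LEMMAS AND PROOFS =====

/-- A's triple test (R, B and L each occur among the three chars) coincides with
B's "one of the six permutations of RBL is a prefix" test. -/
lemma anyPrefix_eq (c1 c2 c3 : Char) (rest : List Char) :
    altPerms.any (fun p => p.isPrefixOf (c1 :: c2 :: c3 :: rest)) =
    ((c1 == 'R' || c2 == 'R' || c3 == 'R') &&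
     (c1 == 'B' || c2 == 'B' || c3 == 'B') &&
     (c1 == 'L' || c2 == 'L' || c3 == 'L')) := by
  rw [Bool.eq_iff_iff]
  constructor
  · intro h
    simp only [altPerms, List.any_cons, List.any_nil, List.isPrefixOf,
      Bool.or_eq_true, Bool.and_eq_true, beq_iff_eq, and_true, or_false,
      Bool.false_eq_true] at h
    rcases h with ⟨h1, h2, h3⟩ | ⟨h1, h2, h3⟩ | ⟨h1, h2, h3⟩ |
      ⟨h1, h2, h3⟩ | ⟨h1, h2, h3⟩ | ⟨h1, h2, h3⟩ <;> subst_vars <;> decide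
  · intro h
    simp only [Bool.or_eq_true, Bool.and_eq_true, beq_iff_eq] at h
    obtain ⟨⟨hR, hB⟩, hL⟩ := h
    simp only [altPerms, List.any_cons, List.any_nil, List.isPrefixOf,
      Bool.or_eq_true, Bool.and_eq_true, beq_iff_eq, and_true, or_false,
      Bool.false_eq_true]
    rcases hR with (h1R | h2R) | h3R <;> rcases hB with (h1B | h2B) | h3B <;>
      rcases hL with (h1L | h2L) | h3L <;> simp_all
lemma altSub_nil : altSub [] = [] := by rw [altSub]

lemma anyPrefix_short_false (cs : List Char) (h : cs.length ≤ 2) :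
    altPerms.any (fun p => p.isPrefixOf cs) = false := by
  match cs, h with
  | [], _ => decide
  | [a], _ => simp [altPerms, List.isPrefixOf]
  | [a, b], _ => simp [altPerms, List.isPrefixOf]

lemma altSub_short (cs : List Char) (h : cs.length ≤ 2) :
    altSub cs = cs.map altRepl1 := by
  match cs, h with
  | [], _ => exact altSub_nil
  | [a], _ =>
    rw [altSub, if_neg (by rw [anyPrefix_short_false [a] (by simp)]; simp)]
    rw [altSub_nil]; rfl
  | [a, b], _ =>
    rw [altSub, if_neg (by rw [anyPrefix_short_false [a, b] (by simp)]; simp)]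
    rw [altSub, if_neg (by rw [anyPrefix_short_false [b] (by simp)]; simp)]
    rw [altSub_nil]; rfl

lemma altRepl1_cases (c : Char) :
    (c == 'R') = true ∧ altRepl1 c = 'S' ∨
    (c == 'R') = false ∧ (c == 'B') = true ∧ altRepl1 c = 'K' ∨
    (c == 'R') = false ∧ (c == 'B') = false ∧ altRepl1 c = 'H' := by
  by_cases hR : (c == 'R') = true
  · exact Or.inl ⟨hR, by simp [altRepl1, hR]⟩
  · by_cases hB : (c == 'B') = true
    · exact Or.inr (Or.inl ⟨by simpa using hR, hB, by simp [altRepl1, hR, hB]⟩)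
    · exact Or.inr (Or.inr ⟨by simpa using hR, by simpa using hB,
        by simp [altRepl1, hR, hB]⟩)

lemma loopA_eq (cs : List Char) :
    ∀ (n i : Nat) (acc : List Char), cs.length - i ≤ n →
      protinapadLoop cs cs.length i acc = acc ++ altSub (cs.drop i) := by
  intro n
  induction n with
  | zero =>
    intro i acc h
    have hi : ¬ i < cs.length := by omega
    have hd : cs.drop i = [] := List.drop_eq_nil_of_le (by omega)
    rw [protinapadLoop]
    simp [hi, hd, altSub_nil]
  | succ n ih =>
    intro i acc h
    by_cases hi : i < cs.length
    · have hdrop : cs.drop i = cs[i] :: cs.drop (i + 1) := List.drop_eq_getElem_cons hi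
      rw [protinapadLoop]
      simp only [hi, dif_pos, List.getD_eq_getElem cs ' ' hi]
      by_cases h2 : i + 2 < cs.length
      · have h1 : i + 1 < cs.length := by omega
        have hdrop1 : cs.drop (i + 1) = cs[i + 1] :: cs.drop (i + 2) :=
          List.drop_eq_getElem_cons h1
        have hdrop2 : cs.drop (i + 2) = cs[i + 2] :: cs.drop (i + 3) :=
          List.drop_eq_getElem_cons h2
        rw [List.getD_eq_getElem cs ' ' h1, List.getD_eq_getElem cs ' ' h2]
        by_cases hc : ((cs[i] == 'R' || cs[i+1] == 'R' || cs[i+2] == 'R') &&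
            (cs[i] == 'B' || cs[i+1] == 'B' || cs[i+2] == 'B') &&
            (cs[i] == 'L' || cs[i+1] == 'L' || cs[i+2] == 'L')) = true
        · rw [if_pos (by simp [h2, hc])]
          rw [ih (i + 3) (acc ++ ['C']) (by omega)]
          have : altSub (cs.drop i) = 'C' :: altSub (cs.drop (i + 3)) := by
            conv_lhs => rw [hdrop, hdrop1, hdrop2]
            rw [altSub, if_pos (by rw [anyPrefix_eq]; exact hc)]
            rfl
          rw [this]; simp
        · rw [if_neg (by simp [hc])]
          have hsub : altSub (cs.drop i) = altRepl1 cs[i] :: altSub (cs.drop (i + 1)) := by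
            conv_lhs => rw [hdrop]
            rw [altSub, if_neg (by rw [hdrop1, hdrop2, anyPrefix_eq]; exact hc)]
          rcases altRepl1_cases cs[i] with ⟨hR, hv⟩ | ⟨hR, hB, hv⟩ | ⟨hR, hB, hv⟩
          · rw [if_pos hR, ih (i + 1) _ (by omega), hsub, hv]; simp
          · rw [if_neg (by simp [hR]), if_pos hB, ih (i + 1) _ (by omega), hsub, hv]; simp
          · rw [if_neg (by simp [hR]), if_neg (by simp [hB]),
              ih (i + 1) _ (by omega), hsub, hv]; simp
      · rw [if_neg (by simp [h2])]
        have hlen1 : (cs.drop (i + 1)).length ≤ 2 := by simp; omega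
        have hlen0 : (cs.drop i).length ≤ 2 := by simp; omega
        have hsub : altSub (cs.drop i) = altRepl1 cs[i] :: altSub (cs.drop (i + 1)) := by
          rw [altSub_short _ hlen0, altSub_short _ hlen1, hdrop, List.map_cons]
        rcases altRepl1_cases cs[i] with ⟨hR, hv⟩ | ⟨hR, hB, hv⟩ | ⟨hR, hB, hv⟩
        · rw [if_pos hR, ih (i + 1) _ (by omega), hsub, hv]; simp
        · rw [if_neg (by simp [hR]), if_pos hB, ih (i + 1) _ (by omega), hsub, hv]; simp
        · rw [if_neg (by simp [hR]), if_neg (by simp [hB]),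
            ih (i + 1) _ (by omega), hsub, hv]; simp
    · have hd : cs.drop i = [] := List.drop_eq_nil_of_le (by omega)
      rw [protinapadLoop]
      simp [hi, hd, altSub_nil]

-- ===== VERDICT (by name: the statement is the Claim_ definition above) =====
theorem protinapad_spec : Claim_equal_protinapad := by
  intro niz _
  unfold Spec_protinapad protinapad protinapad_alt
  rw [loopA_eq niz.toList niz.toList.length 0 [] (by omega)]
  simp
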